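-- pv_equiv track=rewrite | github.com/KartikP/SpikingData_tutorials | Axion Misc Functions/burst_detection.py | find_histogram_edges
-- ===== SOURCE A (Python) =====
-- def find_histogram_edges(network_counts, start_threshold=2, end_threshold=1):
--     edges = []
--     exceeding_threshold = False
--     fr = []
--     for i, count in enumerate(network_counts):
--         if exceeding_threshold and count <= end_threshold:
--             edges.append(i)
--             exceeding_threshold = False
--             fr.append(tmp)
--         elif not exceeding_threshold and count >= start_threshold:
--             edges.append(i)
--             exceeding_threshold = True
--             tmp = 0
--         if exceeding_threshold and network_counts[i] > tmp:
--             tmp = network_counts[i]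
--
--     return edges, fr
-- ===== SOURCE B (Python) =====
-- def find_histogram_edges(network_counts, start_threshold=2, end_threshold=1):
--     # Phase 1: threshold state machine collecting edge indices only.
--     edges = []
--     exceeding = False
--     for i, count in enumerate(network_counts):
--         if exceeding:
--             if count <= end_threshold:
--                 edges.append(i)
--                 exceeding = False
--         elif count >= start_threshold:
--             edges.append(i)
--             exceeding = True
--     # Phase 2: one peak per complete (start, end) pair; a trailing unpaired
--     # start gets no entry.  The running peak starts at 0 in the state-machine
--     # formulation, so the peak is the max of 0 and the counts in [start, end).
--     fr = []
--     it = iter(edges)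
--     for s, e in zip(it, it):
--         fr.append(max([0] + network_counts[s:e]))
--     return edges, fr
-- ===== Notes on version B (the rewrite author's own statement) =====
-- stated objective: simpler
-- what changed: A interleaves burst-peak tracking (tmp) into the threshold state machine; B first runs the bare start/end state machine to collect edges, then computes each burst's peak as a slice maximum over each complete (start, end) pair.
import Mathlib
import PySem

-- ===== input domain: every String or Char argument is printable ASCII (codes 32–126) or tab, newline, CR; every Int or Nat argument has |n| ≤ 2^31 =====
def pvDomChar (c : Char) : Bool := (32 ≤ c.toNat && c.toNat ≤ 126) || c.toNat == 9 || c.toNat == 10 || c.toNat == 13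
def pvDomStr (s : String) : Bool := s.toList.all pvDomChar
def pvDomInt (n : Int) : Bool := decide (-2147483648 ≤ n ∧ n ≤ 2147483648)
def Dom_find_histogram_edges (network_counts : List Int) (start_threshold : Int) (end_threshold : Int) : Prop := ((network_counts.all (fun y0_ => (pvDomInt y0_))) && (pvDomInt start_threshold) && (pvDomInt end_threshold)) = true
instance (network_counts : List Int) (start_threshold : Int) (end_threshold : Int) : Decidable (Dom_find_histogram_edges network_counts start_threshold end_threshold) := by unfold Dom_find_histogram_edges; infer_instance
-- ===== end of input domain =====

-- B replaces A's single pass carrying a running burst maximum by two phases: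
-- the bare start/end state machine, then one slice-maximum per complete edge pair
-- (objective: simpler decomposition; same cost).

-- ===== PORT A =====
-- one iteration of A's loop body; state = (edges, exceeding_threshold, fr, tmp)
-- (Python's `tmp` is unbound until the first burst starts and is read only while
-- exceeding_threshold holds, so initialising it to 0 is unobservable; inside the
-- loop `network_counts[i]` is exactly `count` by enumerate)
def pvAStep (start_threshold end_threshold : Int)
    (st : List Int × Bool × List Int × Int) (p : Int × Int) :
    List Int × Bool × List Int × Int :=
  let edges := st.1; let exceeding := st.2.1; let fr := st.2.2.1; let tmp := st.2.2.2
  let i := p.1; let count := p.2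
  let s1 : List Int × Bool × List Int × Int :=
    if exceeding ∧ count ≤ end_threshold then (edges ++ [i], false, fr ++ [tmp], tmp)
    else if ¬ exceeding ∧ count ≥ start_threshold then (edges ++ [i], true, fr, 0)
    else (edges, exceeding, fr, tmp)
  if s1.2.1 ∧ count > s1.2.2.2 then (s1.1, s1.2.1, s1.2.2.1, count) else s1

def find_histogram_edges (network_counts : List Int) (start_threshold : Int) (end_threshold : Int) : List Int × List Int :=
  let r := (PySem.List.enumerate network_counts).foldl (pvAStep start_threshold end_threshold) ([], false, [], 0)
  (r.1, r.2.2.1)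

-- ===== PORT B =====
-- phase 1: one iteration of the bare state machine; state = (edges, exceeding)
def pvBStep (start_threshold end_threshold : Int)
    (st : List Int × Bool) (p : Int × Int) : List Int × Bool :=
  let edges := st.1; let exceeding := st.2
  let i := p.1; let count := p.2
  if exceeding then
    if count ≤ end_threshold then (edges ++ [i], false) else (edges, exceeding)
  else if count ≥ start_threshold then (edges ++ [i], true) else (edges, exceeding)

-- phase 2: the zip(it, it) pairing loop, appending max([0] + network_counts[s:e]) per pair
def pvPairFr (network_counts : List Int) (fr : List Int) : List Int → List Int
  | s :: e :: rest =>
      pvPairFr network_counts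
        (fr ++ [(PySem.List.max? ((0 : Int) :: PySem.List.slice network_counts (some s) (some e)) (fun y => y)).getD 0])
        rest
  | _ => fr

def find_histogram_edges_alt (network_counts : List Int) (start_threshold : Int) (end_threshold : Int) : List Int × List Int :=
  let edges := ((PySem.List.enumerate network_counts).foldl (pvBStep start_threshold end_threshold) ([], false)).1
  (edges, pvPairFr network_counts [] edges)

-- ===== PRECONDITION & SPEC =====
def Spec_find_histogram_edges (network_counts : List Int) (start_threshold : Int) (end_threshold : Int) (out : List Int × List Int) : Prop := out = find_histogram_edges_alt network_counts start_threshold end_threshold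
instance (network_counts : List Int) (start_threshold : Int) (end_threshold : Int) (out : List Int × List Int) : Decidable (Spec_find_histogram_edges network_counts start_threshold end_threshold out) := by unfold Spec_find_histogram_edges; infer_instance

-- ===== CLAIM (what is proved, stated in full; the proofs are below) =====
def Claim_equal_find_histogram_edges : Prop := ∀ (network_counts : List Int) (start_threshold : Int) (end_threshold : Int), Dom_find_histogram_edges network_counts start_threshold end_threshold → Spec_find_histogram_edges network_counts start_threshold end_threshold (find_histogram_edges network_counts start_threshold end_threshold)

-- ===== LEMMAS AND PROOFS =====

-- "evenly paired" edge lists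
inductive pvEP : List Int → Prop
  | nil : pvEP []
  | pair (a b : Int) (l : List Int) : pvEP l → pvEP (a :: b :: l)

-- pvPairFr with empty accumulator
def pvG (nc : List Int) : List Int → List Int := pvPairFr nc []

theorem pvPairFr_acc (nc : List Int) : ∀ (rest fr : List Int), pvPairFr nc fr rest = fr ++ pvG nc rest
  | [], fr => by simp [pvPairFr, pvG]
  | [a], fr => by simp [pvPairFr, pvG]
  | s :: e :: r, fr => by
      have h := pvPairFr_acc nc r
      rw [pvG]
      simp only [pvPairFr, h]
      simp

-- the peak B computes for a pair (s, e)
def pvF (nc : List Int) (s e : Int) : Int :=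
  (PySem.List.max? ((0 : Int) :: PySem.List.slice nc (some s) (some e)) (fun y => y)).getD 0

theorem pvG_cons (nc : List Int) (s e : Int) (l : List Int) :
    pvG nc (s :: e :: l) = pvF nc s e :: pvG nc l := by
  rw [pvG, pvPairFr, pvPairFr_acc nc l]
  simp [pvF, pvG]

theorem pvG_append_pair (nc : List Int) (l : List Int) (hl : pvEP l) (a b : Int) :
    pvG nc (l ++ [a, b]) = pvG nc l ++ [pvF nc a b] := by
  induction hl with
  | nil => rw [List.nil_append, pvG_cons]; rfl
  | pair c d l' _ ih => simp only [List.cons_append, pvG_cons, ih]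

theorem pvG_append_single (nc : List Int) (l : List Int) (hl : pvEP l) (a : Int) :
    pvG nc (l ++ [a]) = pvG nc l := by
  induction hl with
  | nil => rfl
  | pair c d l' _ ih => simp only [List.cons_append, pvG_cons, ih]

theorem pvEP_append_pair (l : List Int) (hl : pvEP l) (a b : Int) : pvEP (l ++ [a, b]) := by
  induction hl with
  | nil => exact pvEP.pair a b [] pvEP.nil
  | pair c d l' _ ih => exact pvEP.pair c d _ ih

-- running maximum of nc over [s, j), clamped below by 0
def pvM (nc : List Int) (s j : Nat) : Int := (((nc.drop s).take (j - s)).foldl max 0)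

theorem pvF_eq_pvM (nc : List Int) (s j : Nat) :
    pvF nc (s : Int) (j : Int) = pvM nc s j := by
  rw [pvF, PySem.List.slice_natCast, PySem.List.max?_id_cons]
  rfl

theorem pvM_self (nc : List Int) (s : Nat) : pvM nc s s = 0 := by
  simp [pvM]

theorem pvM_succ (nc : List Int) (s j : Nat) (hs : s ≤ j) (hj : j < nc.length) :
    pvM nc s (j + 1) = max (pvM nc s j) nc[j] := by
  have h1 : j + 1 - s = (j - s) + 1 := by omega
  have h2 : j - s < (nc.drop s).length := by simp [List.length_drop]; omega
  rw [pvM, pvM, h1, List.take_succ]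
  have h3 : (nc.drop s)[j - s]? = some nc[j] := by
    rw [List.getElem?_drop]
    have : s + (j - s) = j := by omega
    rw [this, List.getElem?_eq_getElem hj]
  rw [h3]
  simp [List.foldl_append]

-- A's post-branch tmp update is a max
theorem pvMaxIf (a b : Int) : (if b > a then b else a) = max a b := by
  split_ifs <;> omega

-- the invariant carried through the loop, on A's full state
def pvInv (nc : List Int) (j : Nat) (st : List Int × Bool × List Int × Int) : Prop :=
  if st.2.1 then
    ∃ (es : List Int) (s : Nat), st.1 = es ++ [(s : Int)] ∧ pvEP es ∧ st.2.2.1 = pvG nc es ∧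
      st.2.2.2 = pvM nc s j ∧ s ≤ j ∧ s < nc.length
  else pvEP st.1 ∧ st.2.2.1 = pvG nc st.1

-- B's state machine is the (edges, exceeding) projection of A's
theorem pvProj (sth eth : Int) : ∀ (l : List (Int × Int)) (st : List Int × Bool × List Int × Int),
    (l.foldl (pvBStep sth eth) (st.1, st.2.1)) =
      ((l.foldl (pvAStep sth eth) st).1, (l.foldl (pvAStep sth eth) st).2.1) := by
  intro l
  induction l with
  | nil => intro st; rfl
  | cons p l ih =>
      intro st
      rw [List.foldl_cons, List.foldl_cons]
      have hstep : pvBStep sth eth (st.1, st.2.1) p =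
          ((pvAStep sth eth st p).1, (pvAStep sth eth st p).2.1) := by
        rcases st with ⟨edges, exceeding, fr, tmp⟩
        rcases p with ⟨i, count⟩
        cases exceeding <;> simp [pvAStep, pvBStep] <;> split_ifs <;> simp_all
      rw [hstep, ih]

-- main loop invariant: folding A's step over the enumerate-suffix starting at j
theorem pvLoop (nc : List Int) (sth eth : Int) :
    ∀ (xs : List Int) (j : Nat), nc.drop j = xs →
      ∀ (st : List Int × Bool × List Int × Int), pvInv nc j st →
        pvInv nc nc.length ((PySem.List.enumerate xs (j : Int)).foldl (pvAStep sth eth) st) := by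
  intro xs
  induction xs with
  | nil =>
      intro j hdrop st hInv
      have hj : nc.length ≤ j := by
        by_contra h
        have := List.drop_eq_nil_iff.mp hdrop
        omega
      rw [PySem.List.enumerate_nil, List.foldl_nil]
      -- pvInv only mentions pvM at the current index in the exceeding case; bump j to length
      rcases st with ⟨edges, exceeding, fr, tmp⟩
      cases exceeding with
      | false => exact hInv
      | true =>
          obtain ⟨es, s, h1, h2, h3, h4, h5, h6⟩ := hInv
          refine ⟨es, s, h1, h2, h3, ?_, by omega, h6⟩
          have t1 : (nc.drop s).take (j - s) = nc.drop s :=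
            List.take_of_length_le (by rw [List.length_drop]; omega)
          have t2 : (nc.drop s).take (nc.length - s) = nc.drop s :=
            List.take_of_length_le (by rw [List.length_drop])
          rw [pvM, t2]
          rw [pvM, t1] at h4
          exact h4
  | cons x xs ih =>
      intro j hdrop st hInv
      have hj : j < nc.length := by
        by_contra h
        rw [List.drop_eq_nil_of_le (by omega)] at hdrop
        exact (List.cons_ne_nil x xs) hdrop.symm
      have hx : nc[j] = x := by
        have h0 : (nc.drop j)[0]? = some x := by rw [hdrop]; rfl
        rw [List.getElem?_drop] at h0
        rw [List.getElem?_eq_getElem (by omega)] at h0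
        exact Option.some.inj h0
      have hdrop' : nc.drop (j + 1) = xs := by
        rw [← List.tail_drop, hdrop]
        rfl
      rw [PySem.List.enumerate_cons, List.foldl_cons]
      have hcast : ((j : Int) + 1) = ((j + 1 : Nat) : Int) := by push_cast; ring
      rw [hcast]
      apply ih (j + 1) hdrop'
      -- one step preserves the invariant (index j, value x = nc[j])
      rcases st with ⟨edges, exceeding, fr, tmp⟩
      cases exceeding with
      | true =>
          obtain ⟨es, s, h1, h2, h3, h4, h5, h6⟩ := hInv
          dsimp only at h1 h3 h4
          by_cases hend : x ≤ eth
          · -- burst ends at j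
            have : pvAStep sth eth (edges, true, fr, tmp) ((j : Int), x) =
                (edges ++ [(j : Int)], false, fr ++ [tmp], tmp) := by
              simp [pvAStep, hend]
            rw [this]
            refine ⟨?_, ?_⟩
            · show pvEP (edges ++ [(j : Int)])
              rw [h1]
              simpa using pvEP_append_pair es h2 _ _
            · show fr ++ [tmp] = pvG nc (edges ++ [(j : Int)])
              rw [h1, h3, h4, List.append_assoc]
              show _ = pvG nc (es ++ [(s : Int), (j : Int)])
              rw [pvG_append_pair nc es h2, pvF_eq_pvM]
          · -- burst continues
            have : pvAStep sth eth (edges, true, fr, tmp) ((j : Int), x) =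
                (edges, true, fr, if x > tmp then x else tmp) := by
              simp [pvAStep, hend]
              split_ifs <;> rfl
            rw [this]
            refine ⟨es, s, h1, h2, h3, ?_, by omega, h6⟩
            show (if x > tmp then x else tmp) = pvM nc s (j + 1)
            rw [pvMaxIf, pvM_succ nc s j h5 hj, h4, hx]
      | false =>
          obtain ⟨h2, h3⟩ := hInv
          dsimp only at h2 h3
          by_cases hstart : x ≥ sth
          · -- burst starts at j
            have : pvAStep sth eth (edges, false, fr, tmp) ((j : Int), x) =
                (edges ++ [(j : Int)], true, fr, if x > 0 then x else 0) := by
              simp [pvAStep, hstart]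
              split_ifs <;> rfl
            rw [this]
            refine ⟨edges, j, rfl, h2, h3, ?_, by omega, hj⟩
            show (if x > 0 then x else 0) = pvM nc j (j + 1)
            rw [pvMaxIf, pvM_succ nc j j (le_refl _) hj, pvM_self, hx]
          · have : pvAStep sth eth (edges, false, fr, tmp) ((j : Int), x) =
                (edges, false, fr, tmp) := by
              simp [pvAStep, hstart]
            rw [this]
            exact ⟨h2, h3⟩

-- ===== VERDICT (by name: the statement is the Claim_ definition above) =====
theorem find_histogram_edges_spec : Claim_equal_find_histogram_edges := by
  intro nc sth eth _
  show find_histogram_edges nc sth eth = find_histogram_edges_alt nc sth eth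
  have hfin := pvLoop nc sth eth nc 0 rfl ([], false, [], 0) ⟨pvEP.nil, rfl⟩
  simp only [Nat.cast_zero] at hfin
  have hproj := pvProj sth eth (PySem.List.enumerate nc) ([], false, [], 0)
  dsimp only at hproj
  show (((PySem.List.enumerate nc).foldl (pvAStep sth eth) ([], false, [], 0)).1,
        ((PySem.List.enumerate nc).foldl (pvAStep sth eth) ([], false, [], 0)).2.2.1) =
       (((PySem.List.enumerate nc).foldl (pvBStep sth eth) ([], false)).1,
        pvPairFr nc [] ((PySem.List.enumerate nc).foldl (pvBStep sth eth) ([], false)).1)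
  rw [hproj]
  dsimp only
  revert hfin
  generalize (PySem.List.enumerate nc).foldl (pvAStep sth eth) ([], false, [], 0) = r
  rcases r with ⟨edges, exceeding, fr, tmp⟩
  intro hfin
  cases exceeding with
  | false =>
      obtain ⟨h2, h3⟩ := hfin
      dsimp only at h3 ⊢
      rw [h3]
      rfl
  | true =>
      obtain ⟨es, s, h1, h2, h3, -, -, -⟩ := hfin
      dsimp only at h1 h3 ⊢
      rw [h1, h3]
      show (es ++ [(s : Int)], pvG nc es) = (es ++ [(s : Int)], pvG nc (es ++ [(s : Int)]))
      rw [pvG_append_single nc es h2]
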